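-- pv_equiv track=rewrite | github.com/DorothyMartha/Python-Recess- | namutamba_dorothy_morningMonday.py | factorial_generator
-- ===== SOURCE A (Python) =====
-- def factorial_generator(n):
--     if n == 0:
--         yield 1
--     else:
--         factorial = 1
--         for num in range(1, n + 1):
--             factorial *= num
--             yield factorial
-- ===== SOURCE B (Python) =====
-- import math
--
-- def factorial_generator(n):
--     if n == 0:
--         yield 1
--     else:
--         for num in range(1, n + 1):
--             yield math.factorial(num)
-- ===== Notes on version B (the rewrite author's own statement) =====
-- stated objective: idiomatic
-- what changed: B drops the threaded running-product accumulator and yields math.factorial(num) independently at each step of the range.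
import Mathlib
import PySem

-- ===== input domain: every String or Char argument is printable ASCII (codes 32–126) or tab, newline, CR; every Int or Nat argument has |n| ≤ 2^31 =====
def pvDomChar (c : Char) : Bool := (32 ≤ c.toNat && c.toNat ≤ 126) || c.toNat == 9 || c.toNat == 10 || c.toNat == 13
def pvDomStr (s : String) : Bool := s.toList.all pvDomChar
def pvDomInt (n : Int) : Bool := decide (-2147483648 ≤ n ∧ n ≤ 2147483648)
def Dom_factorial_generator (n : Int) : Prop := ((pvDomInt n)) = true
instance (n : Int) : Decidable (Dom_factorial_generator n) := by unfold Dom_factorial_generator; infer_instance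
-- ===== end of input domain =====

-- B replaces A's threaded running-product accumulator by an independent math.factorial(num)
-- per range element (more idiomatic, same output); equivalence is about the yielded sequence.

-- ===== PORT A =====
-- A's loop: state is the running product `factorial`; each iteration multiplies and yields.
def fgLoop : List Int → Int → List Int
  | [], _ => []
  | num :: rest, fact => (fact * num) :: fgLoop rest (fact * num)

def factorial_generator (n : Int) : List Int :=
  if n == 0 then [1]
  else fgLoop (PySem.List.pyRange 1 (n + 1) 1) 1

-- ===== PORT B =====
-- math.factorial num (num ≥ 0 on every call B makes) ported as Nat.factorial.
def factorial_generator_alt (n : Int) : List Int :=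
  if n == 0 then [1]
  else (PySem.List.pyRange 1 (n + 1) 1).map (fun num => (Nat.factorial num.toNat : Int))

-- ===== PRECONDITION & SPEC =====
def Spec_factorial_generator (n : Int) (out : List Int) : Prop := out = factorial_generator_alt n
instance (n : Int) (out : List Int) : Decidable (Spec_factorial_generator n out) := by unfold Spec_factorial_generator; infer_instance

-- ===== CLAIM (what is proved, stated in full; the proofs are below) =====
def Claim_equal_factorial_generator : Prop := ∀ (n : Int), Dom_factorial_generator n → Spec_factorial_generator n (factorial_generator n)

-- ===== LEMMAS AND PROOFS =====

-- Running-product loop over consecutive integers starting at a (with accumulator (a-1)!)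
-- produces exactly the independent factorials.
theorem fgLoop_eq_map_factorial (m : Nat) : ∀ (a : Int), 1 ≤ a →
    fgLoop ((List.range m).map (fun (k : Nat) => a + (k : Int))) ((Nat.factorial (a - 1).toNat : Int))
      = ((List.range m).map (fun (k : Nat) => a + (k : Int))).map (fun num => (Nat.factorial num.toNat : Int)) := by
  induction m with
  | zero => intro a _; simp [fgLoop]
  | succ m ih =>
    intro a ha
    have hfact : (Nat.factorial (a - 1).toNat : Int) * a = (Nat.factorial a.toNat : Int) := by
      have h1 : a.toNat = (a - 1).toNat + 1 := by omega
      have h3 : (((a - 1).toNat : Int) + 1) = a := by omega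
      rw [h1, Nat.factorial_succ]
      push_cast
      rw [h3]; ring
    rw [List.range_succ_eq_map]
    simp only [List.map_cons, List.map_map, Function.comp_def, fgLoop]
    have hshift : ∀ (b : Int), (List.range m).map (fun (k : Nat) => b + ((k + 1 : Nat) : Int))
        = (List.range m).map (fun (k : Nat) => (b + 1) + (k : Int)) := by
      intro b; apply List.map_congr_left; intro k _; push_cast; ring
    simp only [Nat.cast_zero, add_zero, List.cons.injEq]
    constructor
    · simpa using hfact
    · have hIH := ih (a + 1) (by omega)
      simp only [add_sub_cancel_right] at hIH
      calc fgLoop ((List.range m).map fun (k : Nat) => a + ((k.succ : Nat) : Int)) ((Nat.factorial (a-1).toNat : Int) * a)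
          = fgLoop ((List.range m).map fun (k : Nat) => (a + 1) + (k : Int)) ((Nat.factorial a.toNat : Int)) := by
            rw [hfact]; congr 1; exact hshift a
        _ = ((List.range m).map fun (k : Nat) => (a + 1) + (k : Int)).map (fun num => (Nat.factorial num.toNat : Int)) := hIH
        _ = (List.range m).map fun (k : Nat) => ((Nat.factorial (a + ((k.succ : Nat) : Int)).toNat : Int)) := by
            rw [List.map_map]; apply List.map_congr_left; intro k _; simp [Function.comp]; ring_nf

-- ===== VERDICT (by name: the statement is the Claim_ definition above) =====
theorem factorial_generator_spec : Claim_equal_factorial_generator := by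
  intro n _
  unfold Spec_factorial_generator factorial_generator factorial_generator_alt
  by_cases h : n = 0
  · simp [h]
  · simp only [beq_iff_eq, h, if_false]
    rw [PySem.List.pyRange_one]
    have h1 : (n + 1 - 1) = n := by ring
    rw [h1]
    have := fgLoop_eq_map_factorial n.toNat 1 (by omega)
    simpa using this
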